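-- pv_equiv track=rewrite | github.com/marcospirchio/excercises | Programacion 1/matrices_reserva_cine.py | butacas_contiguas
-- ===== SOURCE A (Python) =====
-- def butacas_contiguas(matriz):
--     mas_butacas_seguidas = 0
--     for fila in matriz:
--         butacas_seguidas = 0
--         for asiento in fila:
--             if asiento == 0:
--                 butacas_seguidas += 1
--             else:
--                 if butacas_seguidas > mas_butacas_seguidas:
--                     mas_butacas_seguidas = butacas_seguidas
--                 butacas_seguidas = 0  # reinicia el contador a 0 cuando el valor del asiento es 1
--
--         if butacas_seguidas > mas_butacas_seguidas:
--             mas_butacas_seguidas = butacas_seguidas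
--
--     return mas_butacas_seguidas
-- ===== SOURCE B (Python) =====
-- def _zero_runs(fila):
--     """Lengths of the maximal runs of free (0) seats in a row, built explicitly."""
--     runs = [0]
--     for x in fila:
--         if x == 0:
--             runs[-1] += 1
--         else:
--             runs.append(0)
--     return runs
--
--
-- def butacas_contiguas(matriz):
--     return max((r for fila in matriz for r in _zero_runs(fila)), default=0)
-- ===== Notes on version B (the rewrite author's own statement) =====
-- stated objective: idiomatic
-- what changed: B builds the list of maximal zero-run lengths of each row explicitly and takes one max over all of them with default 0, instead of A's incremental counter that is reset on each occupied seat and folded into a running maximum inline.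
import Mathlib
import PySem

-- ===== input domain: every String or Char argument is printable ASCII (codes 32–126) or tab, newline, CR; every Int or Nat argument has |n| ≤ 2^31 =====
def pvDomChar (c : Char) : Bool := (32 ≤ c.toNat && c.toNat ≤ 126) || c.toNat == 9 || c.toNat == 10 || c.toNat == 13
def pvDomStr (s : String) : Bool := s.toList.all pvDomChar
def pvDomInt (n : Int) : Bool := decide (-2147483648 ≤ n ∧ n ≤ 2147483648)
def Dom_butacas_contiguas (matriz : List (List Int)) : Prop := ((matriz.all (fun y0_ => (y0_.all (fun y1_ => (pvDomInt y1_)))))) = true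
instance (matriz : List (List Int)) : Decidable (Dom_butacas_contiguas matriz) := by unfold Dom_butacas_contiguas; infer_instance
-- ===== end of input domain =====

-- B builds the list of maximal zero-run lengths per row explicitly and takes one max
-- (default 0) over all of them, instead of A's counter reset on occupied seats; objective: idiomatic.

-- ===== PORT A =====
-- inner-loop step of A: state (mas_butacas_seguidas, butacas_seguidas)
def pyStepA (st : Int × Int) (asiento : Int) : Int × Int :=
  if asiento = 0 then (st.1, st.2 + 1)
  else ((if st.2 > st.1 then st.2 else st.1), 0)

def butacas_contiguas (matriz : List (List Int)) : Int :=
  matriz.foldl (fun mas fila =>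
    let p := fila.foldl pyStepA (mas, 0)
    if p.2 > p.1 then p.2 else p.1) 0

-- ===== PORT B =====
-- _zero_runs: the runs list is kept reversed, so Python's `runs[-1] += 1` is an
-- increment of the head; `runs.append(0)` is consing 0. Element multiset is the same.
def zeroRunsStep (runs : List Int) (x : Int) : List Int :=
  if x = 0 then (runs.headI + 1) :: runs.tail else 0 :: runs

def zeroRunsRev (fila : List Int) : List Int :=
  fila.foldl zeroRunsStep [0]

-- max(generator, default=0): Python max = PySem.List.max?, default taken when empty
def butacas_contiguas_alt (matriz : List (List Int)) : Int :=
  (PySem.List.max? (matriz.flatMap zeroRunsRev) (fun y => y)).getD 0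

-- ===== PRECONDITION & SPEC =====
def Spec_butacas_contiguas (matriz : List (List Int)) (out : Int) : Prop := out = butacas_contiguas_alt matriz
instance (matriz : List (List Int)) (out : Int) : Decidable (Spec_butacas_contiguas matriz out) := by unfold Spec_butacas_contiguas; infer_instance

-- ===== CLAIM (what is proved, stated in full; the proofs are below) =====
def Claim_equal_butacas_contiguas : Prop := ∀ (matriz : List (List Int)), Dom_butacas_contiguas matriz → Spec_butacas_contiguas matriz (butacas_contiguas matriz)

-- ===== LEMMAS AND PROOFS =====

-- the untouched suffix of the accumulator is just carried along
theorem zeroRuns_append : ∀ (fila : List Int) (c : Int) (rest : List Int),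
    List.foldl zeroRunsStep (c :: rest) fila = List.foldl zeroRunsStep [c] fila ++ rest := by
  intro fila
  induction fila with
  | nil => intro c rest; simp
  | cons x xs ih =>
    intro c rest
    by_cases hx : x = 0
    · simp only [List.foldl, zeroRunsStep, if_pos hx, List.headI, List.tail]
      exact ih (c + 1) rest
    · simp only [List.foldl, zeroRunsStep, if_neg hx]
      rw [ih 0 (c :: rest), ih 0 [c]]
      simp

theorem foldl_max_right_comm : ∀ (l : List Int) (m c : Int),
    l.foldl max (max m c) = max (l.foldl max m) c := by
  intro l
  induction l with
  | nil => intro m c; rfl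
  | cons a t ih =>
    intro m c
    simp only [List.foldl]
    rw [max_right_comm m c a, ih]

-- A's row processing, from running maximum m and current counter c, equals the
-- fold of max over the explicit run list started at c
theorem rowA_eq : ∀ (fila : List Int) (m c : Int),
    (let p := fila.foldl pyStepA (m, c); if p.2 > p.1 then p.2 else p.1)
      = (List.foldl zeroRunsStep [c] fila).foldl max m := by
  intro fila
  induction fila with
  | nil =>
    intro m c
    simp only [List.foldl]
    omega
  | cons x xs ih =>
    intro m c
    by_cases hx : x = 0
    · simpa [List.foldl, pyStepA, zeroRunsStep, hx] using ih m (c + 1)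
    · simp only [List.foldl, pyStepA, if_neg hx, zeroRunsStep]
      rw [ih _ 0, zeroRuns_append xs 0 [c], List.foldl_append]
      simp only [List.foldl]
      have h : (if c > m then c else m) = max m c := by omega
      rw [h, foldl_max_right_comm]

theorem nested_to_flat : ∀ (matriz : List (List Int)) (m : Int),
    matriz.foldl (fun mas fila => (zeroRunsRev fila).foldl max mas) m
      = (matriz.flatMap zeroRunsRev).foldl max m := by
  intro matriz
  induction matriz with
  | nil => intro m; rfl
  | cons f t ih => intro m; simp [List.foldl, List.flatMap_cons, List.foldl_append, ih]

theorem runs_nonneg : ∀ (fila : List Int) (acc : List Int),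
    (∀ r ∈ acc, 0 ≤ r) → ∀ r ∈ List.foldl zeroRunsStep acc fila, 0 ≤ r := by
  intro fila
  induction fila with
  | nil => intro acc h; exact h
  | cons x xs ih =>
    intro acc h
    refine ih _ ?_
    intro r hr
    by_cases hx : x = 0
    · simp only [zeroRunsStep, if_pos hx] at hr
      rcases List.mem_cons.mp hr with hr | hr
      · subst hr
        cases acc with
        | nil => simp
        | cons a t =>
          have := h a (by simp)
          simp only [List.headI]
          omega
      · exact h r (List.mem_of_mem_tail hr)
    · simp only [zeroRunsStep, if_neg hx] at hr
      rcases List.mem_cons.mp hr with hr | hr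
      · omega
      · exact h r hr

theorem zeroRunsRev_nonneg (fila : List Int) : ∀ r ∈ zeroRunsRev fila, 0 ≤ r := by
  refine runs_nonneg fila [0] ?_
  intro r hr
  simp at hr
  omega

-- ===== VERDICT (by name: the statement is the Claim_ definition above) =====
theorem butacas_contiguas_spec : Claim_equal_butacas_contiguas := by
  unfold Claim_equal_butacas_contiguas
  intro matriz _
  unfold Spec_butacas_contiguas butacas_contiguas butacas_contiguas_alt
  have hA : (matriz.foldl (fun mas fila =>
      let p := fila.foldl pyStepA (mas, 0)
      if p.2 > p.1 then p.2 else p.1) 0)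
      = (matriz.flatMap zeroRunsRev).foldl max 0 := by
    rw [← nested_to_flat]
    congr 1
    funext mas fila
    exact rowA_eq fila mas 0
  rw [hA]
  cases hflat : matriz.flatMap zeroRunsRev with
  | nil => simp [PySem.List.max?]
  | cons x t =>
    rw [PySem.List.max?_id_cons]
    have hx : (0 : Int) ≤ x := by
      have hmem : x ∈ matriz.flatMap zeroRunsRev := by rw [hflat]; simp
      rcases List.mem_flatMap.mp hmem with ⟨f, _, hxf⟩
      exact zeroRunsRev_nonneg f x hxf
    simp [List.foldl, max_eq_right hx]
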